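-- pv_equiv track=rewrite | github.com/atpcurr/atpcurr | embed.py | count_literals
-- ===== SOURCE A (Python) =====
-- def leading_zeros(clause):
--     if len(clause) == 0:
--         return 0
--     elif clause[0] == 0:
--         return 1 + leading_zeros(clause[1:])
--     else:
--         return 0
--
-- def count_literals(clause):
--     literals = 0
--     remaining = clause
--     args_needed = 0
--     while len(remaining) > 0:
--         assert args_needed >= 0
--         zeros = leading_zeros(remaining)
--         if args_needed == 0:
--             literals += 1
--             args_needed = zeros
--         else:
--             args_needed += zeros - 1
--         remaining = remaining[zeros+1:]
--     return literals
-- ===== SOURCE B (Python) =====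
-- def count_literals(clause):
--     literals = 0
--     need = 0
--     zrun = 0
--     for x in clause:
--         if x == 0:
--             zrun += 1
--         else:
--             if need == 0:
--                 literals += 1
--                 need = zrun
--             else:
--                 need += zrun - 1
--             zrun = 0
--     if zrun > 0:
--         if need == 0:
--             literals += 1
--     return literals
-- ===== Notes on version B (the rewrite author's own statement) =====
-- stated objective: faster
-- what changed: Replaced the while-loop that repeatedly calls a recursive leading_zeros and rebuilds the remainder by slicing (O(n^2)) with one linear element-by-element pass maintaining a zero-run counter and a trailing-run fixup.
import Mathlib
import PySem

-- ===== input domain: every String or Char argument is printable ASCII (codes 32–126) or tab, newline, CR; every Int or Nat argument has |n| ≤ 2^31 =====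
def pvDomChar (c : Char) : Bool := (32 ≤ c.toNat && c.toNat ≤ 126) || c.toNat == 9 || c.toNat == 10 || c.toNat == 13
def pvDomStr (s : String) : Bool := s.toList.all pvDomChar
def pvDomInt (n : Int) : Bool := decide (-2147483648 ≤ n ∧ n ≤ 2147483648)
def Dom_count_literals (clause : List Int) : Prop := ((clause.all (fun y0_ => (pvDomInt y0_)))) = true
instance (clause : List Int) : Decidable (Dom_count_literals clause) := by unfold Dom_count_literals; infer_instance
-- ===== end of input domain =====

-- B replaces A's quadratic slice-and-recount loop by one linear pass with a zero-run counter.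

-- ===== PORT A =====
-- Python's leading_zeros returns a nonnegative int; Nat is exact here.
def leadingZeros : List Int → Nat
  | [] => 0
  | x :: rest => if x = 0 then 1 + leadingZeros rest else 0

-- the while loop of A; remaining[zeros+1:] with zeros+1 ≥ 0 is List.drop (zeros+1)
def countLitLoop (remaining : List Int) (literals args_needed : Int) : Int :=
  if h : remaining.length > 0 then
    let zeros := leadingZeros remaining
    if args_needed = 0 then
      countLitLoop (remaining.drop (zeros + 1)) (literals + 1) (zeros : Int)
    else
      countLitLoop (remaining.drop (zeros + 1)) literals (args_needed + (zeros : Int) - 1)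
  else literals
termination_by remaining.length
decreasing_by all_goals (simp only [List.length_drop]; omega)

def count_literals (clause : List Int) : Int := countLitLoop clause 0 0

-- ===== PORT B =====
-- state (literals, need, zrun)
def altStep (st : Int × Int × Int) (x : Int) : Int × Int × Int :=
  if x = 0 then (st.1, st.2.1, st.2.2 + 1)
  else if st.2.1 = 0 then (st.1 + 1, st.2.2, 0)
  else (st.1, st.2.1 + st.2.2 - 1, 0)

def count_literals_alt (clause : List Int) : Int :=
  let s := clause.foldl altStep (0, 0, 0)
  if s.2.2 > 0 then (if s.2.1 = 0 then s.1 + 1 else s.1) else s.1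

-- ===== PRECONDITION & SPEC =====
def Spec_count_literals (clause : List Int) (out : Int) : Prop := out = count_literals_alt clause
instance (clause : List Int) (out : Int) : Decidable (Spec_count_literals clause out) := by unfold Spec_count_literals; infer_instance

-- ===== CLAIM (what is proved, stated in full; the proofs are below) =====
def Claim_equal_count_literals : Prop := ∀ (clause : List Int), Dom_count_literals clause → Spec_count_literals clause (count_literals clause)

-- ===== LEMMAS AND PROOFS =====

theorem lz_replicate_append (z : Nat) (rest : List Int) :
    leadingZeros (List.replicate z 0 ++ rest) = z + leadingZeros rest := by
  induction z with
  | zero => simp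
  | succ k ih => simp [List.replicate_succ, leadingZeros, ih]; omega

theorem drop_replicate_cons (z : Nat) (x : Int) (rest : List Int) :
    List.drop (z + 1) (List.replicate z 0 ++ x :: rest) = rest := by
  induction z with
  | zero => simp
  | succ k ih => simpa [List.replicate_succ] using ih

theorem loop_fold (remaining : List Int) : ∀ (z : Nat) (l n : Int),
    countLitLoop (List.replicate z 0 ++ remaining) l n =
      (let s := List.foldl altStep (l, n, (z : Int)) remaining
       if s.2.2 > 0 then (if s.2.1 = 0 then s.1 + 1 else s.1) else s.1) := by
  induction remaining with
  | nil =>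
    intro z l n
    cases z with
    | zero => rw [countLitLoop]; simp
    | succ k =>
      have hz : leadingZeros (List.replicate (k + 1) (0 : Int)) = k + 1 := by
        simpa using lz_replicate_append (k + 1) []
      have hstop : ∀ l' n' : Int, countLitLoop [] l' n' = l' := by
        intro l' n'; rw [countLitLoop]; simp
      rw [countLitLoop]
      simp only [List.append_nil, List.foldl_nil, hz]
      have hrep : List.replicate (k + 1 - (k + 1 + 1)) (0 : Int) = [] := by
        have h0 : k + 1 - (k + 1 + 1) = 0 := by omega
        rw [h0]; rfl
      simp only [List.drop_replicate, hrep, hstop]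
      have hpos : ((k : Int) + 1) > 0 := by positivity
      split_ifs <;> simp_all
  | cons x rest ih =>
    intro z l n
    by_cases hx : x = 0
    · subst hx
      have : List.replicate z (0 : Int) ++ 0 :: rest = List.replicate (z + 1) 0 ++ rest := by
        rw [List.replicate_succ']; simp
      rw [this, ih (z + 1) l n]
      simp only [List.foldl_cons, altStep]
      push_cast
      rfl
    · rw [countLitLoop]
      have hlen : (List.replicate z (0 : Int) ++ x :: rest).length > 0 := by simp
      have hz : leadingZeros (List.replicate z (0 : Int) ++ x :: rest) = z := by
        rw [lz_replicate_append]; simp [leadingZeros, hx]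
      simp only [dif_pos hlen, hz, drop_replicate_cons]
      have ih0 := fun l' n' => ih 0 l' n'
      simp only [List.replicate, List.nil_append, Nat.cast_zero] at ih0
      simp only [List.foldl_cons, altStep, if_neg hx]
      by_cases hn : n = 0 <;> simp [hn, ih0]

theorem count_literals_eq (clause : List Int) :
    count_literals clause = count_literals_alt clause := by
  have h := loop_fold clause 0 0 0
  simpa [count_literals, count_literals_alt] using h

-- ===== VERDICT (by name: the statement is the Claim_ definition above) =====
theorem count_literals_spec : Claim_equal_count_literals := by
  intro clause _
  unfold Spec_count_literals
  exact count_literals_eq clause
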